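-- pv_equiv track=rewrite | github.com/mysticaltech/terraform-hcloud-kube-hetzner | scripts/sync_docs_site.py | _extract_intro
-- ===== SOURCE A (Python) =====
-- def _extract_intro(markdown: str) -> str:
--     lines = markdown.splitlines()
--     cleaned: list[str] = []
--     for line in lines:
--         if line.startswith("# "):
--             cleaned.append(line)
--             continue
--         if line.startswith("<") and line.endswith(">"):
--             continue
--         if line.strip().startswith("[!["):
--             continue
--         cleaned.append(line)
--         if line.strip() == "---":
--             break
--     return "\n".join(cleaned).strip()
-- ===== SOURCE B (Python) =====
-- def _extract_intro(markdown: str) -> str: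
--     lines = markdown.splitlines()
--     cut = next((i for i, l in enumerate(lines) if l.strip() == "---"), len(lines) - 1)
--     kept = [
--         l
--         for l in lines[: cut + 1]
--         if not ((l.startswith("<") and l.endswith(">")) or l.strip().startswith("[!["))
--     ]
--     return "\n".join(kept).strip()
-- ===== Notes on version B (the rewrite author's own statement) =====
-- stated objective: simpler
-- what changed: A's single interleaved loop with continue/break is replaced by a two-pass decomposition: first find the index of the first horizontal-rule line (default end), then filter the prefix up to and including it with one comprehension removing html-tag and badge lines; header lines never match either removal predicate or the rule, so A's early-append and break behaviour is preserved.
import Mathlib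
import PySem

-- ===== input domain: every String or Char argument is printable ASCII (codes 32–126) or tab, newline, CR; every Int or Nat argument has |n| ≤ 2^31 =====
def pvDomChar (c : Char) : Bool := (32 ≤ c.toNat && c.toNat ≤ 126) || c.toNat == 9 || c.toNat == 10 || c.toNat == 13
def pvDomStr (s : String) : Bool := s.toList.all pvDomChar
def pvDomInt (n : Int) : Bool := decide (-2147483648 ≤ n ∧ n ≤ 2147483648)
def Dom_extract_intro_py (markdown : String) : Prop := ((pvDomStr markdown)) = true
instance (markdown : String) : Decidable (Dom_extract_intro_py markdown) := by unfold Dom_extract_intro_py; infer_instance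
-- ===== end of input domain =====

-- B separates the two concerns of A's single break-loop: first find the cut index of the
-- first '---' line, then filter the prefix with one comprehension (objective: simpler).

-- ===== PORT A =====
-- the for-loop with continue/break, as structural recursion over the lines
def pvALoop : List String → List String
  | [] => []
  | l :: rest =>
    if PySem.Str.startswith l "# " then l :: pvALoop rest
    else if PySem.Str.startswith l "<" && PySem.Str.endswith l ">" then pvALoop rest
    else if PySem.Str.startswith (PySem.Str.strip l) "[![" then pvALoop rest
    else if PySem.Str.strip l == "---" then [l]
    else l :: pvALoop rest

def extract_intro_py (markdown : String) : String :=
  PySem.Str.strip (PySem.Str.join "\n" (pvALoop (PySem.Str.splitlines markdown)))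

-- ===== PORT B =====
-- the removal predicate of Source B's comprehension
def pvDrop (l : String) : Bool :=
  (PySem.Str.startswith l "<" && PySem.Str.endswith l ">") ||
    PySem.Str.startswith (PySem.Str.strip l) "[!["

-- cut = next((i for i, l in enumerate(lines) if l.strip() == "---"), len(lines) - 1)
def pvBCut (lines : List String) : Int :=
  match List.findIdx? (fun l => PySem.Str.strip l == "---") lines with
  | some i => (i : Int)
  | none => (lines.length : Int) - 1

def extract_intro_py_alt (markdown : String) : String :=
  let lines := PySem.Str.splitlines markdown
  let cut := pvBCut lines
  let kept := (PySem.List.slice lines none (some (cut + 1))).filter (fun l => !pvDrop l)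
  PySem.Str.strip (PySem.Str.join "\n" kept)

-- ===== PRECONDITION & SPEC =====
def Spec_extract_intro_py (markdown : String) (out : String) : Prop := out = extract_intro_py_alt markdown
instance (markdown : String) (out : String) : Decidable (Spec_extract_intro_py markdown out) := by unfold Spec_extract_intro_py; infer_instance

-- ===== CLAIM (what is proved, stated in full; the proofs are below) =====
def Claim_equal_extract_intro_py : Prop := ∀ (markdown : String), Dom_extract_intro_py markdown → Spec_extract_intro_py markdown (extract_intro_py markdown)

-- ===== LEMMAS AND PROOFS =====

-- dropWhile over a snoc whose last element is kept
theorem pvDropWhile_append_keep {α : Type} (p : α → Bool) (c : α) (h : p c = false) :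
    ∀ l : List α, List.dropWhile p (l ++ [c]) = List.dropWhile p l ++ [c] := by
  intro l
  induction l with
  | nil => simp [List.dropWhile, h]
  | cons x xs ih =>
      by_cases hx : p x = true
      · simpa [List.dropWhile, hx] using ih
      · simp [List.dropWhile, hx] at *

-- stripping a string that starts with a non-space character keeps that first character
theorem pvStrip_cons {l : String} {c : Char} {t : List Char}
    (h : l.toList = c :: t) (hc : PySem.Chars.isspace c = false) :
    ∃ u, (PySem.Str.strip l).toList = c :: u := by
  refine ⟨(List.dropWhile PySem.Chars.isspace t.reverse).reverse, ?_⟩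
  simp only [PySem.Str.toList_strip, h, PySem.Chars.strip, PySem.Chars.lstrip, PySem.Chars.rstrip]
  rw [List.dropWhile_cons_of_neg (by simp [hc])]
  rw [List.reverse_cons, pvDropWhile_append_keep _ _ hc]
  simp

theorem pvStrip_head_ne {l : String} {c : Char} {t : List Char}
    (h : l.toList = c :: t) (hc : PySem.Chars.isspace c = false) (hne : c ≠ '-') :
    (PySem.Str.strip l == "---") = false := by
  obtain ⟨u, hu⟩ := pvStrip_cons h hc
  apply beq_eq_false_iff_ne.mpr
  intro heq
  rw [heq] at hu
  simp at hu
  exact hne hu.1.symm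

-- a header line "# …" is never an html line, never a badge line, and never the rule
theorem pvHeader_toList {l : String} (h : PySem.Str.startswith l "# " = true) :
    ∃ t, l.toList = '#' :: ' ' :: t := by
  simp only [PySem.Str.startswith, PySem.Chars.startswith_iff] at h
  obtain ⟨t, ht⟩ := h
  exact ⟨t, by simpa using ht.symm⟩

theorem pvHeader_not_html {l : String} (h : PySem.Str.startswith l "# " = true) :
    PySem.Str.startswith l "<" = false := by
  obtain ⟨t, ht⟩ := pvHeader_toList h
  simp [PySem.Str.startswith, PySem.Chars.startswith, List.isPrefixOf, ht]

theorem pvHeader_not_badge {l : String} (h : PySem.Str.startswith l "# " = true) :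
    PySem.Str.startswith (PySem.Str.strip l) "[![" = false := by
  obtain ⟨t, ht⟩ := pvHeader_toList h
  obtain ⟨u, hu⟩ := pvStrip_cons ht (by decide)
  simp [PySem.Str.startswith, PySem.Chars.startswith, List.isPrefixOf, hu]

theorem pvHeader_not_rule {l : String} (h : PySem.Str.startswith l "# " = true) :
    (PySem.Str.strip l == "---") = false := by
  obtain ⟨t, ht⟩ := pvHeader_toList h
  exact pvStrip_head_ne ht (by decide) (by decide)

-- an html line is never the rule
theorem pvHtml_not_rule {l : String} (h : PySem.Str.startswith l "<" = true) :
    (PySem.Str.strip l == "---") = false := by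
  simp only [PySem.Str.startswith, PySem.Chars.startswith_iff] at h
  obtain ⟨t, ht⟩ := h
  have ht' : l.toList = '<' :: t := by simpa using ht.symm
  exact pvStrip_head_ne ht' (by decide) (by decide)

-- a badge line is never the rule
theorem pvBadge_not_rule {l : String}
    (h : PySem.Str.startswith (PySem.Str.strip l) "[![" = true) :
    (PySem.Str.strip l == "---") = false := by
  simp only [PySem.Str.startswith, PySem.Chars.startswith_iff] at h
  obtain ⟨t, ht⟩ := h
  apply beq_eq_false_iff_ne.mpr
  intro heq
  rw [heq] at ht
  simp at ht

-- the cut, as the natural number of lines A consumes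
def pvCutN (lines : List String) : Nat :=
  match List.findIdx? (fun l => PySem.Str.strip l == "---") lines with
  | some i => i + 1
  | none => lines.length

theorem pvCutN_cons (l : String) (rest : List String) :
    pvCutN (l :: rest) =
      if (PySem.Str.strip l == "---") then 1 else pvCutN rest + 1 := by
  by_cases h : (PySem.Str.strip l == "---") = true
  · simp [pvCutN, List.findIdx?_cons, h]
  · cases hf : List.findIdx? (fun l => PySem.Str.strip l == "---") rest with
    | none => simp [pvCutN, List.findIdx?_cons, eq_false_of_ne_true h, hf]
    | some i => simp [pvCutN, List.findIdx?_cons, eq_false_of_ne_true h, hf]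

theorem pvSlice_eq_take (lines : List String) :
    PySem.List.slice lines none (some (pvBCut lines + 1)) = lines.take (pvCutN lines) := by
  have h0 : 0 ≤ pvBCut lines + 1 := by
    unfold pvBCut
    cases hf : List.findIdx? (fun l => PySem.Str.strip l == "---") lines
    · simp
    · simp; positivity
  rw [PySem.List.slice_to lines h0]
  congr 1
  unfold pvBCut pvCutN
  cases hf : List.findIdx? (fun l => PySem.Str.strip l == "---") lines with
  | none => simp
  | some i => simp

-- the heart of the equivalence: A's break-loop equals B's take-then-filter
theorem pvLoop_eq_filter_take (lines : List String) :
    pvALoop lines = (lines.take (pvCutN lines)).filter (fun l => !pvDrop l) := by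
  induction lines with
  | nil => simp [pvALoop, pvCutN]
  | cons l rest ih =>
      rw [pvCutN_cons]
      by_cases hH : PySem.Str.startswith l "# " = true
      · have hk : pvDrop l = false := by
          simp only [pvDrop, pvHeader_not_html hH, pvHeader_not_badge hH, Bool.false_and,
            Bool.false_or]
        rw [pvHeader_not_rule hH]
        simp only [pvALoop, hH, pvHeader_not_rule hH, Bool.false_eq_true,
          if_true, if_false, List.take_succ_cons, List.filter_cons, hk, Bool.not_false, ih]
      · by_cases hT : (PySem.Str.startswith l "<" && PySem.Str.endswith l ">") = true
        · have hr : (PySem.Str.strip l == "---") = false :=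
            pvHtml_not_rule (Bool.and_elim_left hT)
          have hk : pvDrop l = true := by simp only [pvDrop, hT, Bool.true_or]
          rw [hr]
          simp only [pvALoop, eq_false_of_ne_true hH, hT, hr, Bool.false_eq_true,
            if_true, if_false, List.take_succ_cons, List.filter_cons, hk,
            Bool.not_true, ih]
        · by_cases hB : PySem.Str.startswith (PySem.Str.strip l) "[![" = true
          · have hr : (PySem.Str.strip l == "---") = false := pvBadge_not_rule hB
            have hk : pvDrop l = true := by simp only [pvDrop, hB, Bool.or_true]
            rw [hr]
            simp only [pvALoop, eq_false_of_ne_true hH, eq_false_of_ne_true hT, hB, hr,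
              Bool.false_eq_true, if_true, if_false, List.take_succ_cons,
              List.filter_cons, hk, Bool.not_true, ih]
          · have hk : pvDrop l = false := by
              simp only [pvDrop, Bool.or_eq_false_iff]
              exact ⟨eq_false_of_ne_true hT, eq_false_of_ne_true hB⟩
            by_cases hr : (PySem.Str.strip l == "---") = true
            · simp only [pvALoop, eq_false_of_ne_true hH, eq_false_of_ne_true hT,
                eq_false_of_ne_true hB, hr, Bool.false_eq_true, if_true,
                if_false, List.take_succ_cons, List.take_zero, List.filter_cons, hk,
                Bool.not_false, List.filter_nil]
            · simp only [pvALoop, eq_false_of_ne_true hH, eq_false_of_ne_true hT,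
                eq_false_of_ne_true hB, eq_false_of_ne_true hr, Bool.false_eq_true,
                if_true, if_false, List.take_succ_cons, List.filter_cons, hk,
                Bool.not_false, ih]

-- ===== VERDICT (by name: the statement is the Claim_ definition above) =====
theorem extract_intro_py_spec : Claim_equal_extract_intro_py := by
  intro markdown _
  show PySem.Str.strip (PySem.Str.join "\n" (pvALoop (PySem.Str.splitlines markdown))) =
    PySem.Str.strip (PySem.Str.join "\n"
      ((PySem.List.slice (PySem.Str.splitlines markdown) none
          (some (pvBCut (PySem.Str.splitlines markdown) + 1))).filter (fun l => !pvDrop l)))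
  rw [pvSlice_eq_take, pvLoop_eq_filter_take]
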